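/- GENERATED by tools/from_farm_form.py from prooffarm-gif/accepted/gif_decode.P/Proof.lean (a worked proof of the farm's unit `gif_decode.P`,
   accepted by the verdict) — do not edit. -/
import Gif.Spec.Units.gif_decode_P
import Gif.Spec.AllSegs

open X86 X86.User Asan ProgX.Base ProgX.Base.Spec Gif.Spec

set_option maxRecDepth 4000
set_option maxHeartbeats 4000000

/-!
  `gif_decode.P` (0x10ad80 … 0x10adda, 17 instructions; gif_driver.c:180): THE PROLOGUE OF A PROTECTED FUNCTION AT HEAP LEVEL
  (no forest, no reader: `after_prologue` of FrameCarry.lean asks for `GifOK`, so its heap half is done here by hand).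
  The blocks below:
    1. the prelude and the walk to the cut behind the last inline shadow store;
    2. `name_stores3`: the memory before the three shadow stores gets the name `M0`,
       `hmem : s.mem = storesMem M0 (base / 8) Gif.Frames.gif_decode.prologue`;
    3. about `M0` (a nest of STACK stores over `e.mem`): the footprint `hsame0`, the saved registers' slots;
    4. `HeapInv.stack_windows` (the stack stores), `HeapInv.prologue_ra` (the own frame is pushed), `prologue_same` (the footprint),
       `Consts.sameExcept` (the constants lie off every window);
    5. the exit assertion `Body`, field by field.
-/

/-- The prologue of `gif_decode` establishes `Body` at 0x10adda. -/
theorem Gif.Spec.Proved.gif_decode_P_ok : Gif.Spec.gif_decode_P.Statement := by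
  intro Lay hLay μ hμ u₀ hcode H rest frames e ret he hpre
  -- 1. THE PRELUDE: the entry's facts (`he_align`, `he_room`, `he_top`, `he_retAddr`, `he_df`, `he_mx` …), the precondition
  have he0 := he
  v_entry he
  have hpre0 := hpre
  obtain ⟨hheap, hglob, hconsts0, hin, hrep, hrep_lo, hrep_hi⟩ := hpre
  -- THE WALK, to the cut behind the last inline shadow store (0x10adda, gif_driver.c:183)
  u_walk hcode [hμ.vendor] until [Gif.L.gif_decode.at_10adda] span [ProgX.Base.L.textLo, ProgX.Base.L.textHi] side (v_side)
  -- 2. NAMING THE MEMORY before the three shadow stores (0x10adb6, 0x10adc2, 0x10adce): the index register's source, then per store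
  -- the displacement as the walker prints it (decimal), its granule offset, its width, its value (decimal)
  have e136 : (e.reg .rsp - 136).toNat = (e.reg .rsp).toNat - 136 := by u_omega
  obtain ⟨M0, hM0, hmem⟩ := name_stores3 (e.reg .rsp - 136) 12582912 12582916 12582920
    0 4 4059165169 4 4 4060410353 8 4 4092788736
    w_mem (by omega) (by decide) (by decide) (by decide) (by decide) (by decide) (by decide)
  have hpro : Gif.Frames.gif_decode.prologue = [⟨0, 4, 4059165169⟩, ⟨4, 4, 4060410353⟩, ⟨8, 4, 4092788736⟩] := rfl
  rw [← hpro, e136] at hmem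
  -- 3. ABOUT `M0`: only stack stores over `e.mem` (five pushes, the frame's three header words)
  have hsame0 : Mem.SameExcept [⟨(e.reg .rsp).toNat - 992, (e.reg .rsp).toNat⟩] e.mem M0 := by
    rw [hM0]
    u_same
  have k_r14 : M0.readLE (e.reg .rsp - 8) 8 = (e.reg .r14).toNat := by
    rw [hM0]
    u_read
  have k_r13 : M0.readLE (e.reg .rsp - 16) 8 = (e.reg .r13).toNat := by
    rw [hM0]
    u_read
  have k_r12 : M0.readLE (e.reg .rsp - 24) 8 = (e.reg .r12).toNat := by
    rw [hM0]
    u_read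
  have k_rbp : M0.readLE (e.reg .rsp - 32) 8 = (e.reg .rbp).toNat := by
    rw [hM0]
    u_read
  have k_rbx : M0.readLE (e.reg .rsp - 40) 8 = (e.reg .rbx).toNat := by
    rw [hM0]
    u_read
  clear hM0 w_mem
  -- 4. THE HEAP behind the prologue. First the stack stores: windows inside the stack region keep the heap's invariant …
  have hwin0 : ∀ w, w ∈ ([⟨(e.reg .rsp).toNat - 992, (e.reg .rsp).toNat⟩] : List Span) → 0x700000 ≤ w.lo ∧ w.hi ≤ 0x800000 := by
    intro w hw
    have hw_eq := List.mem_singleton.mp hw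
    rw [hw_eq]
    simp only
    omega
  obtain ⟨hinv0, -⟩ := hheap.inv.stack_windows hheap.base hsame0 hwin0
  -- … then the three poison stores push the own frame (`HeapInv.prologue_ra`), the clean stack ends at the body's `rsp`
  have hinv1 : HeapInv H rest (gif_decode.framesIn frames e) ((e.reg .rsp).toNat - 136)
      (storesMem M0 (((e.reg .rsp).toNat - 136) / 8) Gif.Frames.gif_decode.prologue) :=
    hinv0.prologue_ra Gif.Frames.gif_decode_ok he_align (Nat.le_refl _) (by omega) (by omega)
  -- the prologue's own footprint (for the return-address slot), and the same in front of the contract's windows (`Core.same`)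
  have hsame1 := prologue_same (top := (e.reg .rsp).toNat) (Fl := Gif.Frames.gif_decode) Gif.Frames.gif_decode_ok
    (ro := 136) (ro' := 40) rfl rfl he_align (by omega) (by omega) hsame0 []
  have hsame2 := prologue_same (top := (e.reg .rsp).toNat) (Fl := Gif.Frames.gif_decode) Gif.Frames.gif_decode_ok
    (ro := 136) (ro' := 40) rfl rfl he_align (by omega) (by omega) hsame0
    [⟨0x800000, 0x1000020⟩, ⟨(e.reg .rdx).toNat, (e.reg .rdx).toNat + 64⟩]
  have hin12 : ∀ s, s ∈ Gif.Frames.gif_decode.prologue → s.idx + s.width ≤ 12 := by decide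
  -- the image's constants lie off the stack window and off the frame's shadow span
  have hconsts1 : Consts (storesMem M0 (((e.reg .rsp).toNat - 136) / 8) Gif.Frames.gif_decode.prologue) := by
    apply hconsts0.sameExcept hsame1
    intro w hw
    simp only [List.mem_cons, List.mem_nil_iff, or_false] at hw
    rcases hw with hw_eq | hw_eq
    · rw [hw_eq]
      right
      simp only
      omega
    · rw [hw_eq]
      right
      unfold shadowSpan
      simp only
      omega
  rw [← hmem] at hinv1 hsame1 hsame2 hconsts1
  -- 5. THE EXIT ASSERTION: `Core` at 0x10adda …
  have hcore : gif_decode.Core Gif.L.gif_decode.at_10adda H rest frames u₀ e ret s_10adce := {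
    entry := he0
    pre := hpre0
    rip := w_rip
    rsp := w_rsp
    r12 := w_r12
    r13 := w_r13
    rbx := w_rbx
    r15 := w_kept.get .r15 rfl
    -- a slot is read THROUGH the shadow stores (`readLE_storesMem`), then in `M0`
    slot_r14 := by
      rw [hmem, readLE_storesMem M0 _ 12 _ hin12 (by omega) _ _ (by u_omega)]
      exact k_r14
    slot_r13 := by
      rw [hmem, readLE_storesMem M0 _ 12 _ hin12 (by omega) _ _ (by u_omega)]
      exact k_r13
    slot_r12 := by
      rw [hmem, readLE_storesMem M0 _ 12 _ hin12 (by omega) _ _ (by u_omega)]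
      exact k_r12
    slot_rbp := by
      rw [hmem, readLE_storesMem M0 _ 12 _ hin12 (by omega) _ _ (by u_omega)]
      exact k_rbp
    slot_rbx := by
      rw [hmem, readLE_storesMem M0 _ 12 _ hin12 (by omega) _ _ (by u_omega)]
      exact k_rbx
    -- the return address: the prologue's footprint ends below its slot
    slot_ra := by
      rw [prologue_same_readLE hsame1 (e.reg .rsp) 8 (Nat.le_refl _) (by omega)]
      exact he_retAddr
    consts := hconsts1
    same := hsame2
    code := ProgX.Base.conv_code_in w_eq
    -- DF and MXCSR by hand (`v_inv` is slow behind a walk with shadow stores)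
    abi := by
      refine ProgX.Base.abiInv_of ?_ ?_
      · rw [w_flags]
        simp only [X86.User.df_setStatus]
        exact he_df
      · rw [w_mxcsr]
        exact he_mx
  }
  -- … and what only the first body segment may use: `rbp = n`, `rdx` still holds `report`, the heap with the own frame pushed
  refine ReachVia.done ?_
  exact {
    core := hcore
    rbp := w_rbp
    rdx := w_kept.get .rdx rfl
    inv := hinv1
  }
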